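-- pv_equiv track=rewrite | github.com/M-Abubakar-Ansari/new-lang | Parser.py | _filter_strings_and_identifiers
-- ===== SOURCE A (Python) =====
-- def _filter_strings_and_identifiers(expr):
--     in_string = False
--     word = ''
--     parts = []
--     for i in expr:
--         if in_string:
--             word += i
--             if i == '"':
--                 in_string = False
--                 parts.append(word)
--                 word = ''
--         else:
--             if i == '"':
--                 if word:
--                     parts.append(word)
--                     word = ''
--                 in_string = True
--                 word += i
--             elif i.isspace() or i == ',':
--                 if word:
--                     parts.append(word)
--                     word = ''
--                 if i == ',':
--                     parts.append(',')
--             else: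
--                 word += i
--     if word:
--         parts.append(word)
--     return parts
-- ===== SOURCE B (Python) =====
-- def _filter_strings_and_identifiers(expr):
--     parts = []
--     rest = expr
--     while rest:
--         c = rest[0]
--         if c == '"':
--             j = rest.find('"', 1)
--             if j == -1:
--                 parts.append(rest)
--                 rest = ''
--             else:
--                 parts.append(rest[:j + 1])
--                 rest = rest[j + 1:]
--         elif c == ',':
--             parts.append(',')
--             rest = rest[1:]
--         elif c.isspace():
--             rest = rest[1:]
--         else:
--             k = 1
--             while k < len(rest) and rest[k] != '"' and rest[k] != ',' and not rest[k].isspace():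
--                 k += 1
--             parts.append(rest[:k])
--             rest = rest[k:]
--     return parts
-- ===== Notes on version B (the rewrite author's own statement) =====
-- stated objective: simpler
-- what changed: Replaced A's per-character state machine (in_string flag plus a growing word accumulator) by a suffix-slicing scanner that dispatches on the first remaining character and takes each string literal, comma or word as one slice (find/takeWhile).
import Mathlib
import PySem

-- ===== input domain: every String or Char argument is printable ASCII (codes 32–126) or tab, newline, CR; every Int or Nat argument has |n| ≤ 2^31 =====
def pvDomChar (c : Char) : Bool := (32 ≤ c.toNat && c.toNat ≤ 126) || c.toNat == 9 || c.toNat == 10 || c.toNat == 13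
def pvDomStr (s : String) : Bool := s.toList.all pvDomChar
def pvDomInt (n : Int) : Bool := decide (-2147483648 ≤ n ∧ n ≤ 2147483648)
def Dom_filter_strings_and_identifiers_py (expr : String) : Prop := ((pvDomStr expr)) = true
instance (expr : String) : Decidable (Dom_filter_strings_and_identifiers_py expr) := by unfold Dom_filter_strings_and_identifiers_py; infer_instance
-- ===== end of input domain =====

-- ===== PORT A =====
-- B (a suffix-slicing scanner) replaces A's per-char in_string/word state machine; objective: simpler decomposition, same cost.
-- A-side: one foldl step per character over the state (in_string, word, parts), as in the Python.
def pvAStep (st : Bool × List Char × List (List Char)) (c : Char) :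
    Bool × List Char × List (List Char) :=
  let inString := st.1
  let word := st.2.1
  let parts := st.2.2
  if inString then
    let word := word ++ [c]
    if c = '"' then (false, [], parts ++ [word]) else (true, word, parts)
  else
    if c = '"' then
      let parts := if word ≠ [] then parts ++ [word] else parts
      (true, ['"'], parts)
    else if PySem.Chars.isspace c || c = ',' then
      let parts := if word ≠ [] then parts ++ [word] else parts
      let parts := if c = ',' then parts ++ [[',']] else parts
      (false, [], parts)
    else
      (false, word ++ [c], parts)

def filter_strings_and_identifiers_py (expr : String) : List String :=
  let st := expr.toList.foldl pvAStep (false, [], [])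
  let parts := if st.2.1 ≠ [] then st.2.2 ++ [st.2.1] else st.2.2
  parts.map (fun w => String.mk w)

-- ===== PORT B =====
-- B-side: scan the remaining suffix; a quote takes a whole string literal slice (rest.find('"',1) ported as
-- takeWhile/dropWhile over the tail), a ',' is a token, whitespace is skipped, anything else takes a word slice.
def pvNotDelim (c : Char) : Bool := !(c = '"' || c = ',' || PySem.Chars.isspace c)

def pvBGo : List Char → List (List Char)
  | [] => []
  | c :: rest =>
    if c = '"' then
      match h : rest.dropWhile (fun d => !(d = '"')) with
      | [] => [c :: rest]
      | q :: rest' =>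
          (c :: (rest.takeWhile (fun d => !(d = '"')) ++ [q])) :: pvBGo rest'
    else if c = ',' then
      [','] :: pvBGo rest
    else if PySem.Chars.isspace c then
      pvBGo rest
    else
      (c :: rest.takeWhile pvNotDelim) :: pvBGo (rest.dropWhile pvNotDelim)
termination_by cs => cs.length
decreasing_by
  all_goals solve
    | (simp; omega)
    | simp
    | (have h1 : (rest.dropWhile (fun d => !(d = '"'))).length ≤ rest.length :=
         rest.length_dropWhile_le _
       rw [h] at h1; simp at h1 ⊢; omega)
    | (have h1 : (rest.dropWhile pvNotDelim).length ≤ rest.length :=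
         rest.length_dropWhile_le _
       simp; omega)

def filter_strings_and_identifiers_py_alt (expr : String) : List String :=
  (pvBGo expr.toList).map (fun w => String.mk w)

-- ===== PRECONDITION & SPEC =====
def Spec_filter_strings_and_identifiers_py (expr : String) (out : List String) : Prop := out = filter_strings_and_identifiers_py_alt expr
instance (expr : String) (out : List String) : Decidable (Spec_filter_strings_and_identifiers_py expr out) := by unfold Spec_filter_strings_and_identifiers_py; infer_instance

-- ===== CLAIM (what is proved, stated in full; the proofs are below) =====
def Claim_equal_filter_strings_and_identifiers_py : Prop := ∀ (expr : String), Dom_filter_strings_and_identifiers_py expr → Spec_filter_strings_and_identifiers_py expr (filter_strings_and_identifiers_py expr)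

-- ===== LEMMAS AND PROOFS =====
def pvFinish (st : Bool × List Char × List (List Char)) : List (List Char) :=
  if st.2.1 ≠ [] then st.2.2 ++ [st.2.1] else st.2.2

-- what B produces from inside a string literal opened with accumulated word `w`
def pvStrFin (w : List Char) (cs : List Char) : List (List Char) :=
  match cs.dropWhile (fun d => !(d = '"')) with
  | [] => [w ++ cs]
  | q :: rest' => (w ++ (cs.takeWhile (fun d => !(d = '"')) ++ [q])) :: pvBGo rest'

-- step-evaluation lemmas for A's fold
theorem pvStep_true (w : List Char) (parts : List (List Char)) (c : Char) :
    pvAStep (true, w, parts) c =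
      if c = '"' then (false, [], parts ++ [w ++ [c]]) else (true, w ++ [c], parts) := by
  simp [pvAStep]

theorem pvStep_false_quote (w : List Char) (parts : List (List Char)) :
    pvAStep (false, w, parts) '"' =
      (true, ['"'], if w ≠ [] then parts ++ [w] else parts) := by
  simp [pvAStep]

theorem pvStep_false_comma (w : List Char) (parts : List (List Char)) :
    pvAStep (false, w, parts) ',' =
      (false, [], (if w ≠ [] then parts ++ [w] else parts) ++ [[',']]) := by
  simp [pvAStep]

theorem pvStep_false_space (w : List Char) (parts : List (List Char)) (c : Char)
    (hq : c ≠ '"') (hs : PySem.Chars.isspace c = true) :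
    pvAStep (false, w, parts) c =
      (false, [], if w ≠ [] then parts ++ [w] else parts) := by
  have hcm : c ≠ ',' := by
    intro h; rw [h] at hs; exact absurd hs (by decide)
  simp [pvAStep, hq, hs, hcm]

theorem pvStep_false_other (w : List Char) (parts : List (List Char)) (c : Char)
    (hq : c ≠ '"') (hcm : c ≠ ',') (hs : PySem.Chars.isspace c = false) :
    pvAStep (false, w, parts) c = (false, w ++ [c], parts) := by
  simp [pvAStep, hq, hs, hcm]

-- unfolding lemmas for B's scanner
theorem pvBGo_quote (rest : List Char) : pvBGo ('"' :: rest) = pvStrFin ['"'] rest := by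
  rw [pvBGo, pvStrFin]
  simp only [if_pos]
  generalize rest.dropWhile (fun d => !(d = '"')) = post
  cases post <;> rfl

theorem pvBGo_comma (rest : List Char) : pvBGo (',' :: rest) = [','] :: pvBGo rest := by
  rw [pvBGo]; simp

theorem pvBGo_space (rest : List Char) (c : Char) (hq : c ≠ '"') (hcm : c ≠ ',')
    (hs : PySem.Chars.isspace c = true) : pvBGo (c :: rest) = pvBGo rest := by
  rw [pvBGo]; simp [hq, hcm, hs]

theorem pvBGo_word (rest : List Char) (c : Char) (hq : c ≠ '"') (hcm : c ≠ ',')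
    (hs : PySem.Chars.isspace c = false) :
    pvBGo (c :: rest) =
      (c :: rest.takeWhile pvNotDelim) :: pvBGo (rest.dropWhile pvNotDelim) := by
  rw [pvBGo]; simp [hq, hcm, hs]

theorem pvStrFin_quote (w : List Char) (rest : List Char) :
    pvStrFin w ('"' :: rest) = (w ++ ['"']) :: pvBGo rest := by
  simp [pvStrFin]

theorem pvStrFin_cons (w : List Char) (rest : List Char) (c : Char) (hq : c ≠ '"') :
    pvStrFin w (c :: rest) = pvStrFin (w ++ [c]) rest := by
  unfold pvStrFin
  rw [List.dropWhile_cons, List.takeWhile_cons]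
  simp only [hq, Bool.not_eq_true', decide_eq_false_iff_not, not_false_eq_true, if_pos]
  cases h : rest.dropWhile (fun d => !(d = '"')) with
  | nil => simp
  | cons q rest' => simp

theorem pvNotDelim_true (c : Char) (hq : c ≠ '"') (hcm : c ≠ ',')
    (hs : PySem.Chars.isspace c = false) : pvNotDelim c = true := by
  simp [pvNotDelim, hq, hcm, hs]

theorem pvNotDelim_false_quote : pvNotDelim '"' = false := by decide
theorem pvNotDelim_false_comma : pvNotDelim ',' = false := by decide
theorem pvNotDelim_false_space (c : Char) (hs : PySem.Chars.isspace c = true) :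
    pvNotDelim c = false := by
  simp [pvNotDelim, hs]

theorem pvMain (cs : List Char) :
    (∀ parts, pvFinish (cs.foldl pvAStep (false, [], parts)) = parts ++ pvBGo cs)
    ∧ (∀ w parts, w ≠ [] → pvFinish (cs.foldl pvAStep (true, w, parts)) = parts ++ pvStrFin w cs)
    ∧ (∀ w parts, w ≠ [] → pvFinish (cs.foldl pvAStep (false, w, parts)) =
        parts ++ ((w ++ cs.takeWhile pvNotDelim) :: pvBGo (cs.dropWhile pvNotDelim))) := by
  induction cs with
  | nil =>
    refine ⟨?_, ?_, ?_⟩ <;> intros <;> simp_all [pvFinish, pvBGo, pvStrFin]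
  | cons c rest ih =>
    obtain ⟨ih1, ih2, ih3⟩ := ih
    refine ⟨?_, ?_, ?_⟩
    · -- neutral state, empty word
      intro parts
      by_cases hq : c = '"'
      · subst hq
        rw [List.foldl_cons, pvStep_false_quote]
        simp only [ne_eq, not_true_eq_false, if_false]
        rw [ih2 ['"'] parts (by simp), pvBGo_quote]
      · by_cases hcm : c = ','
        · subst hcm
          rw [List.foldl_cons, pvStep_false_comma]
          simp only [ne_eq, not_true_eq_false, if_false]
          rw [ih1, pvBGo_comma]
          simp
        · by_cases hs : PySem.Chars.isspace c = true
          · rw [List.foldl_cons, pvStep_false_space _ _ _ hq hs]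
            simp only [ne_eq, not_true_eq_false, if_false]
            rw [ih1, pvBGo_space rest c hq hcm hs]
          · rw [List.foldl_cons,
              pvStep_false_other _ _ _ hq hcm (Bool.eq_false_iff.mpr hs)]
            simp only [List.nil_append]
            rw [ih3 [c] parts (by simp),
              pvBGo_word rest c hq hcm (Bool.eq_false_iff.mpr hs)]
            simp
    · -- inside a string literal
      intro w parts hw
      by_cases hq : c = '"'
      · subst hq
        rw [List.foldl_cons, pvStep_true]
        simp only [if_true]
        rw [ih1, pvStrFin_quote]
        simp
      · rw [List.foldl_cons, pvStep_true]
        simp only [hq, if_false]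
        rw [ih2 (w ++ [c]) parts (by simp), pvStrFin_cons w rest c hq]
    · -- neutral state, nonempty word
      intro w parts hw
      by_cases hq : c = '"'
      · subst hq
        rw [List.foldl_cons, pvStep_false_quote]
        simp only [hw, ne_eq, not_false_eq_true, if_pos]
        rw [ih2 ['"'] (parts ++ [w]) (by simp)]
        rw [List.takeWhile_cons, List.dropWhile_cons]
        simp only [pvNotDelim_false_quote, Bool.false_eq_true, if_false]
        rw [pvBGo_quote]
        simp
      · by_cases hcm : c = ','
        · subst hcm
          rw [List.foldl_cons, pvStep_false_comma]
          simp only [hw, ne_eq, not_false_eq_true, if_pos]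
          rw [ih1]
          rw [List.takeWhile_cons, List.dropWhile_cons]
          simp only [pvNotDelim_false_comma, Bool.false_eq_true, if_false]
          rw [pvBGo_comma]
          simp
        · by_cases hs : PySem.Chars.isspace c = true
          · rw [List.foldl_cons, pvStep_false_space _ _ _ hq hs]
            simp only [hw, ne_eq, not_false_eq_true, if_pos]
            rw [ih1]
            rw [List.takeWhile_cons, List.dropWhile_cons]
            simp only [pvNotDelim_false_space c hs, Bool.false_eq_true, if_false]
            rw [pvBGo_space rest c hq hcm hs]
            simp
          · rw [List.foldl_cons,
              pvStep_false_other _ _ _ hq hcm (Bool.eq_false_iff.mpr hs)]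
            rw [ih3 (w ++ [c]) parts (by simp)]
            rw [List.takeWhile_cons, List.dropWhile_cons]
            simp only [pvNotDelim_true c hq hcm (Bool.eq_false_iff.mpr hs), if_pos]
            simp

-- ===== VERDICT (by name: the statement is the Claim_ definition above) =====
theorem filter_strings_and_identifiers_py_spec : Claim_equal_filter_strings_and_identifiers_py := by
  intro expr _
  unfold Spec_filter_strings_and_identifiers_py
  unfold filter_strings_and_identifiers_py filter_strings_and_identifiers_py_alt
  have h := (pvMain expr.toList).1 []
  simp only [pvFinish] at h
  simp only [h]
  simp
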